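-- pv_equiv track=rewrite | github.com/Harmiel715/vboard | mutterboard.py | _balanced_row_widths
-- ===== SOURCE A (Python) =====
-- from typing import Dict, List, Optional, Set
--
-- KEY_WIDTHS = {
--     "`": 1,
--     "Space": 12,
--     "CapsLock": 3,
--     "Shift_L": 4,
--     "Shift_R": 4,
--     "Backspace": 3,
--     "\\": 3,
--     "Enter": 4,
-- }
--
-- def _balanced_row_widths(row: List[str], target_width: int) -> List[int]:
--     widths = [KEY_WIDTHS.get(label, 2) for label in row]
--     deficit = target_width - sum(widths)
--     idx = 0
--     while deficit > 0 and widths: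
--         widths[idx % len(widths)] += 1
--         idx += 1
--         deficit -= 1
--     return widths
-- ===== SOURCE B (Python) =====
-- from typing import Dict, List, Optional, Set
--
-- KEY_WIDTHS = {
--     "`": 1,
--     "Space": 12,
--     "CapsLock": 3,
--     "Shift_L": 4,
--     "Shift_R": 4,
--     "Backspace": 3,
--     "\\": 3,
--     "Enter": 4,
-- }
--
-- def _balanced_row_widths(row: List[str], target_width: int) -> List[int]:
--     widths = [KEY_WIDTHS.get(label, 2) for label in row]
--     deficit = target_width - sum(widths)
--     if deficit > 0 and widths:
--         q, r = divmod(deficit, len(widths))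
--         widths = [w + q + (1 if i < r else 0) for i, w in enumerate(widths)]
--     return widths
-- ===== Notes on version B (the rewrite author's own statement) =====
-- stated objective: alternative
-- what changed: Replaced the one-unit-per-iteration round-robin while loop (deficit iterations) with a closed-form divmod distribution: every width gets deficit//n and the first deficit%n widths get one extra.
import Mathlib
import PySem

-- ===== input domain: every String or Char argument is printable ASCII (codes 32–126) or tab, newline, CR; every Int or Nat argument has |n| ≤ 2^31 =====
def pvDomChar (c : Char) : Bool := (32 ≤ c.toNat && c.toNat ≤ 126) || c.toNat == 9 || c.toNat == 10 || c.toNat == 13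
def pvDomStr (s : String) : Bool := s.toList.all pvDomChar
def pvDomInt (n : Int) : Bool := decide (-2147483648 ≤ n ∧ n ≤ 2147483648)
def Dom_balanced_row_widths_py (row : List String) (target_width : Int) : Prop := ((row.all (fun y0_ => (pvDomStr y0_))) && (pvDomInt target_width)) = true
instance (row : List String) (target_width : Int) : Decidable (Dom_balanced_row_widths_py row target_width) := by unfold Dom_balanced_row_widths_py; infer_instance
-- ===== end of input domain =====

-- B replaces A's one-unit-per-iteration round-robin while loop by a closed-form divmod
-- distribution (objective: alternative algorithm; same measured cost on the tested inputs).

-- ===== PORT A =====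
-- the module constant KEY_WIDTHS (shared by both Pythons)
def pvKeyWidths : PySem.Dict String Int :=
  ((((((((PySem.Dict.empty).insert "`" 1).insert "Space" 12).insert "CapsLock" 3).insert
      "Shift_L" 4).insert "Shift_R" 4).insert "Backspace" 3).insert "\\" 3).insert "Enter" 4

-- the while loop of A; fuel = deficit (the loop decrements deficit by exactly 1 per iteration)
def pvLoopA (widths : List Int) (idx : Nat) (fuel : Nat) : List Int :=
  match fuel with
  | 0 => widths
  | f + 1 =>
      if widths.isEmpty then widths
      else pvLoopA (widths.modify (idx % widths.length) (· + 1)) (idx + 1) f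

def balanced_row_widths_py (row : List String) (target_width : Int) : List Int :=
  let widths := row.map (fun label => pvKeyWidths.getD label 2)
  let deficit := target_width - widths.sum
  pvLoopA widths 0 deficit.toNat

-- ===== PORT B =====
def balanced_row_widths_py_alt (row : List String) (target_width : Int) : List Int :=
  let widths := row.map (fun label => pvKeyWidths.getD label 2)
  let deficit := target_width - widths.sum
  if deficit > 0 ∧ widths ≠ [] then
    let q := PySem.Int.floordiv deficit (widths.length : Int)
    let r := PySem.Int.mod deficit (widths.length : Int)
    (PySem.List.enumerate widths).map (fun p => p.2 + q + (if p.1 < r then 1 else 0))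
  else widths

-- ===== PRECONDITION & SPEC =====
def Spec_balanced_row_widths_py (row : List String) (target_width : Int) (out : List Int) : Prop := out = balanced_row_widths_py_alt row target_width
instance (row : List String) (target_width : Int) (out : List Int) : Decidable (Spec_balanced_row_widths_py row target_width out) := by unfold Spec_balanced_row_widths_py; infer_instance

-- ===== CLAIM (what is proved, stated in full; the proofs are below) =====
def Claim_equal_balanced_row_widths_py : Prop := ∀ (row : List String) (target_width : Int), Dom_balanced_row_widths_py row target_width → Spec_balanced_row_widths_py row target_width (balanced_row_widths_py row target_width)

-- ===== LEMMAS AND PROOFS =====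

-- number of k < d with (j + k) % n = i
def pvCnt (d j n i : Nat) : Nat := (List.range d).countP (fun k => (j + k) % n == i)

theorem pvCnt_succ_front (d j n i : Nat) :
    pvCnt (d + 1) j n i = (if j % n = i then 1 else 0) + pvCnt d (j + 1) n i := by
  unfold pvCnt
  rw [List.range_succ_eq_map, List.countP_cons, List.countP_map]
  have h : ((fun k => (j + k) % n == i) ∘ Nat.succ) = (fun k => (j + 1 + k) % n == i) := by
    funext k
    have h2 : j + (k + 1) = j + 1 + k := by omega
    simp [Function.comp, Nat.succ_eq_add_one, h2]
  rw [h]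
  by_cases hji : j % n = i <;> simp [hji, Nat.add_comm]

theorem pvLoopA_eq (d : Nat) (ws : List Int) (j : Nat) (h : ws ≠ []) :
    pvLoopA ws j d = ws.mapIdx (fun i w => w + (pvCnt d j ws.length i : Int)) := by
  induction d generalizing ws j with
  | zero =>
      apply List.ext_getElem (by simp [pvLoopA])
      intro i h1 h2
      simp [pvLoopA, pvCnt, List.getElem_mapIdx]
  | succ f ih =>
      have hne : ¬ ws.isEmpty := by simpa using h
      have hlen : (ws.modify (j % ws.length) (· + 1)).length = ws.length :=
        List.length_modify _ _ _
      have hne' : ws.modify (j % ws.length) (· + 1) ≠ [] := by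
        intro hc
        apply h
        have := hlen
        rw [hc] at this
        exact List.eq_nil_of_length_eq_zero this.symm
      rw [pvLoopA]
      simp only [hne, if_neg, Bool.false_eq_true, not_false_iff]
      rw [ih _ _ hne', hlen]
      apply List.ext_getElem (by simp [hlen])
      intro i h1 h2
      simp only [List.getElem_mapIdx, List.getElem_modify]
      rw [pvCnt_succ_front]
      by_cases hij : j % ws.length = i <;> simp [hij] <;> ring

theorem pvCnt_closed (d n i : Nat) (hn : 0 < n) (hi : i < n) :
    pvCnt d 0 n i = d / n + (if i < d % n then 1 else 0) := by
  induction d with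
  | zero => simp [pvCnt]
  | succ d ih =>
      have hstep : pvCnt (d + 1) 0 n i = pvCnt d 0 n i + (if d % n = i then 1 else 0) := by
        unfold pvCnt
        rw [List.range_succ, List.countP_append]
        simp
      rw [hstep, ih]
      have hdm : d % n < n := Nat.mod_lt _ hn
      have hd : n * (d / n) + d % n = d := Nat.div_add_mod d n
      by_cases hc : d % n + 1 = n
      · -- d + 1 is a multiple of n
        have h1 : d + 1 = n * (d / n + 1) := by rw [Nat.mul_add, Nat.mul_one]; omega
        have hdiv : (d + 1) / n = d / n + 1 := by
          rw [h1, Nat.mul_div_cancel_left _ hn]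
        have hmod : (d + 1) % n = 0 := by
          rw [h1, Nat.mul_mod_right]
        rw [hdiv, hmod]
        split_ifs <;> omega
      · have h1 : d + 1 = n * (d / n) + (d % n + 1) := by omega
        have hlt : d % n + 1 < n := by omega
        have hdiv : (d + 1) / n = d / n := by
          rw [h1, Nat.mul_add_div hn, Nat.div_eq_of_lt hlt, Nat.add_zero]
        have hmod : (d + 1) % n = d % n + 1 := by
          rw [h1, Nat.mul_add_mod, Nat.mod_eq_of_lt hlt]
        rw [hdiv, hmod]
        split_ifs <;> omega

theorem pvLoopA_nil (j f : Nat) : pvLoopA [] j f = [] := by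
  cases f <;> simp [pvLoopA]

-- ===== VERDICT (by name: the statement is the Claim_ definition above) =====
theorem balanced_row_widths_py_spec : Claim_equal_balanced_row_widths_py := by
  intro row target_width _dom
  unfold Spec_balanced_row_widths_py balanced_row_widths_py balanced_row_widths_py_alt
  dsimp only
  set ws : List Int := row.map (fun label => pvKeyWidths.getD label 2) with hws
  set dz : Int := target_width - ws.sum with hdz
  by_cases hb : ws = []
  · rw [hb]
    simp [pvLoopA_nil]
  · by_cases hd : 0 < dz
    · have hcond : (dz > 0 ∧ ws ≠ []) := ⟨hd, hb⟩
      rw [if_pos hcond]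
      have hn : 0 < ws.length := List.length_pos_iff.mpr hb
      have hdn : dz = ((dz.toNat : Nat) : Int) := (Int.toNat_of_nonneg (le_of_lt hd)).symm
      have hq : PySem.Int.floordiv dz (ws.length : Int) = ((dz.toNat / ws.length : Nat) : Int) := by
        rw [hdn]; exact_mod_cast PySem.Int.floordiv_natCast dz.toNat ws.length
      have hr : PySem.Int.mod dz (ws.length : Int) = ((dz.toNat % ws.length : Nat) : Int) := by
        rw [hdn]; exact_mod_cast PySem.Int.mod_natCast dz.toNat ws.length
      rw [pvLoopA_eq dz.toNat ws 0 hb]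
      apply List.ext_getElem (by simp [PySem.List.length_enumerate])
      intro i h1 h2
      have hilen : i < ws.length := by
        simpa using h1
      simp only [List.getElem_mapIdx, List.getElem_map, PySem.List.getElem_enumerate]
      simp only [hq, hr]
      rw [pvCnt_closed dz.toNat ws.length i hn hilen]
      have hcast : ((0 : Int) + (i : Int) < ((dz.toNat % ws.length : Nat) : Int)) ↔
          (i < dz.toNat % ws.length) := by
        constructor <;> intro hx <;> omega
      by_cases hlt : i < dz.toNat % ws.length
      · rw [if_pos (hcast.mpr hlt), if_pos hlt]
        push_cast
        ring
      · rw [if_neg (fun hx => hlt (hcast.mp hx)), if_neg hlt]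
        push_cast
        ring
    · have hfuel : dz.toNat = 0 := by omega
      rw [hfuel]
      rw [if_neg (by intro hc; exact hd hc.1)]
      rfl
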